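-- pv_equiv track=rewrite | github.com/sandialabs/pyGSTi | pygsti/layouts/prefixtable.py | _pair_elements
-- ===== SOURCE A (Python) =====
-- def _pair_elements(lst):
--     paired_list = []
--     length = len(lst)
--
--     for i in range((length + 1) // 2):
--         if i == length - i - 1:
--             paired_list.append((lst[i], lst[i]))
--         else:
--             paired_list.append((lst[i], lst[length - i - 1]))
--
--     return paired_list
-- ===== SOURCE B (Python) =====
-- def _pair_elements(lst):
--     n = len(lst)
--     half = (n + 1) // 2
--     front = lst[:half]
--     back = lst[n - half:][::-1]
--     return list(zip(front, back))
-- ===== Notes on version B (the rewrite author's own statement) =====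
-- stated objective: idiomatic
-- what changed: Replaces the index loop with its self-pairing branch by materialising the front slice and the reversed back slice and zipping them; the odd-length middle self-pair falls out of the shared middle index with no conditional.
import Mathlib
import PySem

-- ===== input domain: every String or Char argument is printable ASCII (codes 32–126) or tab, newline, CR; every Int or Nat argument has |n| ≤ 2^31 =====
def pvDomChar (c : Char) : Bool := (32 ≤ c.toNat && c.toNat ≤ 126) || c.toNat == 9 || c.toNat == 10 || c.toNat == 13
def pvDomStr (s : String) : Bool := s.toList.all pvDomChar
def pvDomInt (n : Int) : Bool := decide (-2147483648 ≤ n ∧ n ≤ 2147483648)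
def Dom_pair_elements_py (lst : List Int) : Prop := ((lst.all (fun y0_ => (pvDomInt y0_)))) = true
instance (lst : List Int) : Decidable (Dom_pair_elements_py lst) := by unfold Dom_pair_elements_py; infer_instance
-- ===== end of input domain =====

-- B pairs the list from both ends by zipping the front slice with the reversed back slice (idiomatic; same O(n) cost).

-- ===== PORT A =====
-- indices i and length-i-1 are always in range for i in range((length+1)//2), so pyGetD's default is never used
def pair_elements_py (lst : List Int) : List (Int × Int) :=
  let length : Int := lst.length
  (PySem.List.pyRange 0 (PySem.Int.floordiv (length + 1) 2) 1).foldl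
    (fun paired_list i =>
      if i = length - i - 1 then
        paired_list ++ [(PySem.List.pyGetD lst i 0, PySem.List.pyGetD lst i 0)]
      else
        paired_list ++ [(PySem.List.pyGetD lst i 0, PySem.List.pyGetD lst (length - i - 1) 0)])
    []

-- ===== PORT B =====
def pair_elements_py_alt (lst : List Int) : List (Int × Int) :=
  let n : Int := lst.length
  let half : Int := PySem.Int.floordiv (n + 1) 2
  let front := PySem.List.slice lst none (some half)
  let back := (PySem.List.slice lst (some (n - half)) none).reverse
  front.zip back

-- ===== PRECONDITION & SPEC =====
def Spec_pair_elements_py (lst : List Int) (out : List (Int × Int)) : Prop := out = pair_elements_py_alt lst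
instance (lst : List Int) (out : List (Int × Int)) : Decidable (Spec_pair_elements_py lst out) := by unfold Spec_pair_elements_py; infer_instance

-- ===== CLAIM (what is proved, stated in full; the proofs are below) =====
def Claim_equal_pair_elements_py : Prop := ∀ (lst : List Int), Dom_pair_elements_py lst → Spec_pair_elements_py lst (pair_elements_py lst)

-- ===== LEMMAS AND PROOFS =====

lemma pair_elements_py_eq_map (lst : List Int) :
    pair_elements_py lst
      = (List.range ((lst.length + 1) / 2)).map
          (fun k => (lst.getD k 0, lst.getD (lst.length - k - 1) 0)) := by
  unfold pair_elements_py
  have hfd : PySem.Int.floordiv ((lst.length : Int) + 1) 2 = (((lst.length + 1) / 2 : Nat) : Int) := by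
    have := PySem.Int.floordiv_natCast (lst.length + 1) 2
    simp [this]
  simp only [hfd, PySem.List.pyRange_zero_natCast]
  rw [List.foldl_map]
  have : ∀ (acc : List (Int × Int)) (k : Nat), k ∈ List.range ((lst.length + 1) / 2) →
      (fun paired_list (i : Int) =>
        if i = (lst.length : Int) - i - 1 then
          paired_list ++ [(PySem.List.pyGetD lst i 0, PySem.List.pyGetD lst i 0)]
        else
          paired_list ++ [(PySem.List.pyGetD lst i 0, PySem.List.pyGetD lst ((lst.length : Int) - i - 1) 0)]) acc (k : Int)
      = acc ++ [(lst.getD k 0, lst.getD (lst.length - k - 1) 0)] := by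
    intro acc k hk
    simp only [List.mem_range] at hk
    have hk2 : k < lst.length := by omega
    have hidx : (lst.length : Int) - (k : Int) - 1 = ((lst.length - k - 1 : Nat) : Int) := by
      push_cast; omega
    simp only [hidx, PySem.List.pyGetD_natCast]
    split_ifs with hEq
    · have hk3 : k = lst.length - k - 1 := by exact_mod_cast hEq
      rw [← hk3]
    · rfl
  calc (List.range ((lst.length + 1) / 2)).foldl _ []
      = (List.range ((lst.length + 1) / 2)).foldl
          (fun acc k => acc ++ [(lst.getD k 0, lst.getD (lst.length - k - 1) 0)]) [] := by
        apply PySem.List.foldl_congr_mem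
        intro acc k hk
        exact this acc k hk
    _ = [] ++ (List.range ((lst.length + 1) / 2)).map
          (fun k => (lst.getD k 0, lst.getD (lst.length - k - 1) 0)) :=
        PySem.List.foldl_append_singleton_eq_map _ _ _
    _ = _ := by simp

lemma pair_elements_py_alt_eq (lst : List Int) :
    pair_elements_py_alt lst
      = (lst.take ((lst.length + 1) / 2)).zip
          ((lst.drop (lst.length - (lst.length + 1) / 2)).reverse) := by
  unfold pair_elements_py_alt
  have hfd : PySem.Int.floordiv ((lst.length : Int) + 1) 2 = (((lst.length + 1) / 2 : Nat) : Int) := by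
    have := PySem.Int.floordiv_natCast (lst.length + 1) 2
    simp [this]
  have hhalf_le : (lst.length + 1) / 2 ≤ lst.length := by omega
  have hsub : (lst.length : Int) - (((lst.length + 1) / 2 : Nat) : Int)
      = ((lst.length - (lst.length + 1) / 2 : Nat) : Int) := by omega
  simp only [hfd, hsub, PySem.List.slice_to_natCast, PySem.List.slice_from_natCast]

-- ===== VERDICT (by name: the statement is the Claim_ definition above) =====
theorem pair_elements_py_spec : Claim_equal_pair_elements_py := by
  intro lst _
  show pair_elements_py lst = pair_elements_py_alt lst
  rw [pair_elements_py_eq_map, pair_elements_py_alt_eq]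
  set m := lst.length with hm
  set h := (m + 1) / 2 with hh
  have hhm : h ≤ m := by omega
  apply List.ext_getElem
  · simp [List.length_zip]
    omega
  · intro j hj1 hj2
    have hjh : j < h := by simpa using hj1
    have hjm : j < m := by omega
    simp only [List.getElem_map, List.getElem_range, List.getElem_zip,
      List.getElem_take, List.getElem_reverse, List.getElem_drop]
    have hlenrev : (lst.drop (m - h)).length = h := by rw [List.length_drop]; omega
    have hidx2 : m - j - 1 = m - h + ((lst.drop (m - h)).length - 1 - j) := by
      rw [hlenrev]; omega
    rw [List.getD_eq_getElem lst 0 hjm, List.getD_eq_getElem lst 0 (by omega : m - j - 1 < lst.length)]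
    simp only [Prod.mk.injEq]
    exact ⟨trivial, by simp only [hidx2]⟩
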